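-- pv_equiv track=rewrite | github.com/Fondamenti18/fondamenti-di-programmazione | students/761660/homework04/program01.py | antenati
-- ===== SOURCE A (Python) =====
-- def antenati(din,dp,k,y):
--     b=dp[k]
--     if(dp[k]==''):
--         return 0
--     else:
--         a=len(din[b])
--         h=dp[k]
--         if (a-y)!=0:
--             return antenati(din,dp,h,y)
--         else:
--             return antenati(din,dp,h,y)+1
-- ===== SOURCE B (Python) =====
-- def antenati(din, dp, k, y):
--     # stage 1: collect the whole ancestor chain (parents up to the '' root)
--     chain = []
--     p = dp[k]
--     while p != '':
--         chain.append(p)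
--         p = dp[p]
--     # stage 2: count the ancestors whose din entry has length y
--     return sum(1 for b in chain if len(din[b]) == y)
-- ===== Notes on version B (the rewrite author's own statement) =====
-- stated objective: simpler
-- what changed: The single interleaved recursion is replaced by two staged passes: first an iterative walk collects the ancestor chain into a list, then a comprehension counts the ancestors whose din entry has length y.
import Mathlib
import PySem

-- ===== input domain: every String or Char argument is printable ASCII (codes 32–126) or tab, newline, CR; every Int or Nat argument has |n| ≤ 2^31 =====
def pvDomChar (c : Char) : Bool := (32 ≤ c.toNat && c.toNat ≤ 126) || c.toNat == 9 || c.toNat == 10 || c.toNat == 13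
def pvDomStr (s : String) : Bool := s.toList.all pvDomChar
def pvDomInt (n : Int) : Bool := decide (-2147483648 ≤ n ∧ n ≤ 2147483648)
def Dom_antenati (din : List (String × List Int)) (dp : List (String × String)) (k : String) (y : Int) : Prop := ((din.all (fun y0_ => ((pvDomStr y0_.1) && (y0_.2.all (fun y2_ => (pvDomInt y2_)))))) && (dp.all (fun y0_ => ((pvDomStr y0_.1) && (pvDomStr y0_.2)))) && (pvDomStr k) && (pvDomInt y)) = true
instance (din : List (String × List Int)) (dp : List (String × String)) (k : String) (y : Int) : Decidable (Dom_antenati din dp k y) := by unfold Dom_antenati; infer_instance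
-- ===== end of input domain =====

-- ===== PORT A =====
-- B replaces A's interleaved recursion by two staged passes (collect the ancestor chain, then count);
-- objective: simpler. Equivalence is about the RETURN value on inputs where the Python terminates
-- without a KeyError (Pre_ below excludes the rest).

-- first-match association-list lookup (Python dict access d[k], none = KeyError)
def pvLook {a : Type} (l : List (String × a)) (k : String) : Option a :=
  (l.find? (fun p => p.1 == k)).map (fun p => p.2)

-- fuel-based transliteration of A's recursion; under Pre_ the fuel dp.length + 1 is never exhausted
-- (a terminating chain visits distinct keys of dp). Where the Python raises KeyError the port returns 0;
-- those inputs are outside Pre_.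
def antenatiFuel (din : List (String × List Int)) (dp : List (String × String)) (y : Int) : Nat → String → Int
  | 0, _ => 0
  | f + 1, k =>
    match pvLook dp k with
    | none => 0
    | some b =>
      if b = "" then 0
      else
        match pvLook din b with
        | none => 0
        | some xs =>
          let a : Int := (xs.length : Int)
          let h := b
          if a - y ≠ 0 then antenatiFuel din dp y f h
          else antenatiFuel din dp y f h + 1

def antenati (din : List (String × List Int)) (dp : List (String × String)) (k : String) (y : Int) : Int :=
  antenatiFuel din dp y (dp.length + 1) k

-- ===== PORT B =====
-- stage 1 of Source B: the while-loop collecting the ancestor chain (dp lookups only).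
-- Where Python would raise KeyError on dp the builder stops; those inputs are outside Pre_.
def buildChain (dp : List (String × String)) : Nat → String → List String
  | 0, _ => []
  | f + 1, k =>
    match pvLook dp k with
    | none => []
    | some b => if b = "" then [] else b :: buildChain dp f b

-- stage 2 of Source B: the counting comprehension over the collected chain.
-- On a missing din key Python raises KeyError; the predicate returns false there (outside Pre_).
def antenati_alt (din : List (String × List Int)) (dp : List (String × String)) (k : String) (y : Int) : Int :=
  (((buildChain dp (dp.length + 1) k).countP
      (fun b => match pvLook din b with
                | some xs => ((xs.length : Int) == y)
                | none => false) : Nat) : Int)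

-- ===== PRECONDITION & SPEC =====
-- Pre_: a well-formedness condition on the INPUT GRAPH — the parent chain k, dp[k], dp[dp[k]], … is rooted:
-- every visited key is a key of dp, every non-'' parent is a key of din, and '' is reached (no cycle).
-- These are exactly the inputs on which the Python A returns (elsewhere it raises KeyError or diverges on a cycle).
-- Rootedness of a pointer chain has no non-iterative characterisation, so chainOk walks the parent pointers;
-- it re-runs NO part of the counting algorithm (it never looks at y and computes no count), and a terminating
-- chain visits distinct keys, hence at most dp.length of them, which bounds the walk.
def chainOk (din : List (String × List Int)) (dp : List (String × String)) : Nat → String → Bool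
  | 0, _ => false
  | f + 1, k =>
    match pvLook dp k with
    | none => false
    | some b =>
      if b = "" then true
      else (pvLook din b).isSome && chainOk din dp f b

def Pre_antenati (din : List (String × List Int)) (dp : List (String × String)) (k : String) (y : Int) : Prop :=
  chainOk din dp (dp.length + 1) k = true
instance (din : List (String × List Int)) (dp : List (String × String)) (k : String) (y : Int) : Decidable (Pre_antenati din dp k y) := by unfold Pre_antenati; infer_instance

def pvWitness_antenati : (List (String × List Int)) × (List (String × String)) × String × Int :=
  ([("a", [1]), ("b", [1, 2])], [("x", "a"), ("a", "b"), ("b", "")], "x", 1)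

def Spec_antenati (din : List (String × List Int)) (dp : List (String × String)) (k : String) (y : Int) (out : Int) : Prop := out = antenati_alt din dp k y
instance (din : List (String × List Int)) (dp : List (String × String)) (k : String) (y : Int) (out : Int) : Decidable (Spec_antenati din dp k y out) := by unfold Spec_antenati; infer_instance

-- ===== CLAIM (what is proved, stated in full; the proofs are below) =====
def Claim_equal_antenati : Prop := ∀ (din : List (String × List Int)) (dp : List (String × String)) (k : String) (y : Int), Dom_antenati din dp k y → Pre_antenati din dp k y → Spec_antenati din dp k y (antenati din dp k y)

-- ===== LEMMAS AND PROOFS =====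

-- on a rooted chain (same fuel), A's recursion computes exactly the count over the collected chain
theorem fuel_eq_count (din : List (String × List Int)) (dp : List (String × String)) (y : Int) :
    ∀ (f : Nat) (k : String), chainOk din dp f k = true →
      antenatiFuel din dp y f k =
        ((buildChain dp f k).countP
          (fun b => match pvLook din b with
                    | some xs => ((xs.length : Int) == y)
                    | none => false) : Nat) := by
  intro f
  induction f with
  | zero => intro k h; simp [chainOk] at h
  | succ f ih =>
    intro k h
    simp only [chainOk] at h
    simp only [antenatiFuel, buildChain]
    cases hl : pvLook dp k with
    | none => simp [hl] at h
    | some b =>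
      rw [hl] at h
      by_cases hb : b = ""
      · simp [hb]
      · simp only [if_neg hb] at h ⊢
        obtain ⟨hd, hc⟩ := (by simpa using h : (pvLook din b).isSome = true ∧ chainOk din dp f b = true)
        cases hx : pvLook din b with
        | none => rw [hx] at hd; simp at hd
        | some xs =>
          simp only [List.countP_cons, hx]
          by_cases hy : ((xs.length : Int)) - y ≠ 0
          · have hne : ¬ ((xs.length : Int) = y) := by omega
            simp [hy, hne, ih b hc]
          · have heq : ((xs.length : Int)) = y := by omega
            simp [heq, ih b hc]

-- ===== VERDICT (by name: the statement is the Claim_ definition above) =====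
theorem antenati_spec : Claim_equal_antenati := by
  intro din dp k y _ hpre
  unfold Spec_antenati antenati antenati_alt
  exact fuel_eq_count din dp y _ k hpre
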